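-- pv_equiv track=rewrite | github.com/Zachmayers/nuforc-data-scraper | clean_data.py | has_bad_character
-- ===== SOURCE A (Python) =====
-- BAD_CHARACTERS = ['(', ')', '{','}', '/', ',','.', '+', 'unknown']
--
-- def has_bad_character(city):
--     if type(city) is not str:
--         return True
--
--     for ch in BAD_CHARACTERS:
--         if ch in city:
--             return True
--
--     spl = city.split(' ')
--     if len(city.split(' ')) > 3:
--         return True
--
--     return False
-- ===== SOURCE B (Python) =====
-- def has_bad_character(city):
--     if type(city) is not str:
--         return True
--     # single left-to-right pass: punctuation check, space count, and a
--     # 7-char sliding window detecting the literal 'unknown'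
--     spaces = 0
--     window = ''
--     found = False
--     for c in city:
--         if c in '(){}/,.+':
--             return True
--         if c == ' ':
--             spaces += 1
--         window = (window + c)[-7:]
--         if window == 'unknown':
--             found = True
--     return found or spaces > 2
-- ===== Notes on version B (the rewrite author's own statement) =====
-- stated objective: alternative
-- what changed: B replaces A's nine separate substring scans plus a split-and-measure by a single left-to-right pass over the characters that simultaneously checks a punctuation class, counts spaces, and detects the literal 'unknown' with a 7-character sliding window.
import Mathlib
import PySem

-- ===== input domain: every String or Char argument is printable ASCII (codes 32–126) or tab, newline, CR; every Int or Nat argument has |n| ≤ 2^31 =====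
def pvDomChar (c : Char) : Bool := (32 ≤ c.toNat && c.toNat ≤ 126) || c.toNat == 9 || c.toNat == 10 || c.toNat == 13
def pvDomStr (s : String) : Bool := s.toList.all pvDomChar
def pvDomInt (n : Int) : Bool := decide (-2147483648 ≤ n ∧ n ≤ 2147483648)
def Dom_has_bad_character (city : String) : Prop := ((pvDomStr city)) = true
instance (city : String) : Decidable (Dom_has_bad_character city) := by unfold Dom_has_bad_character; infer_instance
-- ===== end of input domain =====

-- B replaces A's nine separate substring scans plus split by ONE left-to-right pass that
-- checks a punctuation class, counts spaces, and detects 'unknown' via a 7-char sliding window.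


-- ===== PORT A =====
-- BAD_CHARACTERS = ['(', ')', '{','}', '/', ',','.', '+', 'unknown']
def BAD_CHARACTERS : List String := ["(", ")", "{", "}", "/", ",", ".", "+", "unknown"]

-- the 'for ch in BAD_CHARACTERS' loop with early return; after the loop, the split check
def hbcLoop (chs : List String) (city : String) : Bool :=
  match chs with
  | [] => decide (3 < (PySem.Chars.splitOn city.toList " ".toList).length)
  | ch :: rest => if PySem.Str.isIn ch city then true else hbcLoop rest city

def has_bad_character (city : String) : Bool :=
  -- 'type(city) is not str' is always False for a String argument
  hbcLoop BAD_CHARACTERS city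

-- ===== PORT B =====
-- Python's s[-7:] on a string of chars l (exact: drop all but the last 7, whole list if shorter)
def pvLast7 (l : List Char) : List Char := l.drop (l.length - 7)

-- the 'for c in city' loop of Source B: early return on punctuation, space counter,
-- sliding window 'window = (window + c)[-7:]' compared with 'unknown'
def altLoop (cs : List Char) (win : List Char) (spaces : Nat) (found : Bool) : Bool :=
  match cs with
  | [] => found || decide (2 < spaces)
  | c :: rest =>
    if "(){}/,.+".toList.contains c then true
    else
      altLoop rest (pvLast7 (win ++ [c]))
        (if c = ' ' then spaces + 1 else spaces)
        (found || (pvLast7 (win ++ [c]) == "unknown".toList))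

def has_bad_character_alt (city : String) : Bool :=
  altLoop city.toList [] 0 false

-- ===== PRECONDITION & SPEC =====
def Spec_has_bad_character (city : String) (out : Bool) : Prop := out = has_bad_character_alt city
instance (city : String) (out : Bool) : Decidable (Spec_has_bad_character city out) := by unfold Spec_has_bad_character; infer_instance

-- ===== CLAIM (what is proved, stated in full; the proofs are below) =====
def Claim_equal_has_bad_character : Prop := ∀ (city : String), Dom_has_bad_character city → Spec_has_bad_character city (has_bad_character city)

-- ===== LEMMAS AND PROOFS =====

-- splitOn with a single-char separator produces (number of separators) + 1 pieces
theorem splitOn_go_length (c : Char) :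
    ∀ (fuel : Nat) (l cur : List Char) (acc : List (List Char)), l.length ≤ fuel →
      (PySem.Chars.splitOn.go [c] fuel l cur acc).length = acc.length + 1 + l.count c := by
  intro fuel
  induction fuel with
  | zero =>
    intro l cur acc h
    have : l = [] := List.eq_nil_of_length_eq_zero (Nat.le_zero.mp h)
    subst this
    simp [PySem.Chars.splitOn.go]
  | succ n ih =>
    intro l cur acc h
    cases l with
    | nil => simp [PySem.Chars.splitOn.go]
    | cons x rest =>
      by_cases hx : x = c
      · subst hx
        have hpre : [x].isPrefixOf (x :: rest) = true := by simp [List.isPrefixOf]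
        rw [PySem.Chars.splitOn.go]
        simp only [hpre, if_true, List.length_cons, List.length_nil, List.drop_succ_cons, List.drop_zero]
        rw [ih rest [] ((cur.reverse) :: acc) (by simpa using Nat.le_of_succ_le_succ h)]
        simp
        omega
      · have hpre : [c].isPrefixOf (x :: rest) = false := by
          simp [List.isPrefixOf]
          exact fun hc => (hx hc.symm).elim
        rw [PySem.Chars.splitOn.go]
        simp only [hpre, Bool.false_eq_true, if_false]
        rw [ih rest (x :: cur) acc (by simpa using Nat.le_of_succ_le_succ h)]
        simp [hx]

theorem splitOn_single_length (l : List Char) (c : Char) :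
    (PySem.Chars.splitOn l [c]).length = l.count c + 1 := by
  unfold PySem.Chars.splitOn
  rw [splitOn_go_length c (l.length + 1) l [] [] (by omega)]
  simp [Nat.add_comm]

-- 'c in s' for a one-character substring is char membership
theorem isIn_single (c : Char) (l : List Char) :
    PySem.Chars.isIn [c] l = l.contains c := by
  by_cases h : c ∈ l
  · rw [(PySem.Chars.isIn_iff_infix [c] l).mpr ((List.singleton_infix_iff c l).mpr h)]
    simpa using h
  · rw [(PySem.Chars.isIn_eq_false_iff [c] l).mpr (fun hinf => h ((List.singleton_infix_iff c l).mp hinf))]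
    simpa using h

-- the for-loop with early return is an 'any' over BAD_CHARACTERS, followed by the split check
theorem hbcLoop_any (chs : List String) (city : String) :
    hbcLoop chs city =
      (chs.any (fun ch => PySem.Str.isIn ch city)
        || decide (3 < (PySem.Chars.splitOn city.toList " ".toList).length)) := by
  induction chs with
  | nil => simp [hbcLoop]
  | cons ch rest ih =>
    rw [hbcLoop, ih]
    cases h : PySem.Chars.isIn ch.toList city.toList <;>
      simp [PySem.Str.isIn_eq, h]

theorem any_contains_comm (l cs : List Char) :
    l.any (fun c => cs.contains c) = cs.any (fun c => l.contains c) := by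
  rw [Bool.eq_iff_iff]
  simp only [List.any_eq_true, List.contains_iff_mem]
  exact ⟨fun ⟨a, h1, h2⟩ => ⟨a, h2, h1⟩, fun ⟨a, h1, h2⟩ => ⟨a, h2, h1⟩⟩

-- a 7-element pattern is a suffix of u iff the last-7 window of u equals it
theorem suffix_iff_last7 (p u : List Char) (hp : p.length = 7) :
    p <:+ u ↔ pvLast7 u = p := by
  constructor
  · rintro ⟨s, rfl⟩
    unfold pvLast7
    rw [List.length_append, hp]
    have : s.length + 7 - 7 = s.length := by omega
    rw [this, List.drop_left]
  · intro h
    rw [← h]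
    exact List.drop_suffix _ _

-- last-7 of (last-7 t ++ [c]) = last-7 of (t ++ [c])
theorem last7_step (t : List Char) (c : Char) :
    pvLast7 (pvLast7 t ++ [c]) = pvLast7 (t ++ [c]) := by
  unfold pvLast7
  by_cases h : t.length ≤ 7
  · have h1 : t.length - 7 = 0 := by omega
    rw [h1, List.drop_zero]
  · have hlen : (t.drop (t.length - 7)).length = 7 := by
      rw [List.length_drop]; omega
    rw [List.length_append, List.length_append, hlen]
    have h2 : 7 + [c].length - 7 = 1 := by simp
    rw [h2]
    have h3 : (1 : Nat) ≤ (t.drop (t.length - 7)).length := by omega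
    rw [List.drop_append_of_le_length h3, List.drop_drop]
    have h4 : t.length + [c].length - 7 = (t.length - 6) := by
      simp only [List.length_cons, List.length_nil]; omega
    rw [h4]
    have h5 : t.length - 7 + 1 = t.length - 6 := by omega
    rw [h5]
    have h6 : t.length - 6 ≤ t.length := by omega
    rw [List.drop_append_of_le_length h6]

-- infix of t ++ [c] decomposes into infix of t or suffix of t ++ [c]
theorem infix_concat_iff (p t : List Char) (c : Char) :
    p <:+: (t ++ [c]) ↔ (p <:+: t ∨ p <:+ (t ++ [c])) := by
  constructor
  · rintro ⟨s, u, h⟩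
    rcases List.eq_nil_or_concat u with rfl | ⟨u', c', rfl⟩
    · right; exact ⟨s, by simpa using h⟩
    · left
      simp only [List.concat_eq_append] at h
      rw [← List.append_assoc] at h
      exact ⟨s, u', List.append_inj_left' h (by simp)⟩
  · rintro (h | h)
    · exact h.trans (List.prefix_append t [c]).isInfix
    · exact h.isInfix

-- the loop invariant: win is the last-7 window of the processed prefix t,
-- found records whether 'unknown' is an infix of t
theorem altLoop_spec (p : List Char) (hp : p = "unknown".toList) :
    ∀ (rest t : List Char) (spaces : Nat) (found : Bool),
      found = decide (p <:+: t) →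
      altLoop rest (pvLast7 t) spaces found =
        (rest.any (fun c => "(){}/,.+".toList.contains c)
          || decide (p <:+: (t ++ rest))
          || decide (2 < spaces + rest.count ' ')) := by
  have hplen : p.length = 7 := by rw [hp]; rfl
  intro rest
  induction rest with
  | nil =>
    intro t spaces found hf
    simp [altLoop, hf, Bool.or_comm]
  | cons c rest ih =>
    intro t spaces found hf
    rw [altLoop]
    cases hc : "(){}/,.+".toList.contains c with
    | true =>
      simp only [hc, if_true, List.any_cons, Bool.true_or]
    | false =>
      simp only [Bool.false_eq_true, if_false]
      rw [last7_step]
      have hfound' : (found || (pvLast7 (t ++ [c]) == "unknown".toList))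
          = decide (p <:+: (t ++ [c])) := by
        rw [hf, ← hp]
        rw [Bool.eq_iff_iff]
        simp only [Bool.or_eq_true, decide_eq_true_eq, beq_iff_eq]
        rw [← suffix_iff_last7 p (t ++ [c]) hplen, infix_concat_iff]
      rw [hfound', ih (t ++ [c]) _ _ rfl]
      rw [show t ++ c :: rest = (t ++ [c]) ++ rest by simp]
      simp only [List.any_cons, hc, Bool.false_or, List.count_cons]
      congr 1
      rw [Bool.eq_iff_iff, decide_eq_true_eq, decide_eq_true_eq]
      by_cases hc' : c = ' ' <;> simp [hc'] ; omega

-- ===== VERDICT (by name: the statement is the Claim_ definition above) =====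
set_option maxHeartbeats 1000000 in
theorem has_bad_character_spec : Claim_equal_has_bad_character := by
  intro city _
  unfold Spec_has_bad_character has_bad_character has_bad_character_alt
  rw [hbcLoop_any]
  have hB := altLoop_spec "unknown".toList rfl city.toList [] 0 false (by
    rw [Bool.eq_iff_iff]
    simp only [Bool.false_eq_true, decide_eq_true_eq, false_iff]
    intro h
    have := h.length_le
    simp at this)
  simp only [List.nil_append] at hB
  rw [show pvLast7 [] = ([] : List Char) from rfl] at hB
  rw [hB, any_contains_comm]
  have hsplit := splitOn_single_length city.toList ' '
  have hws : (" " : String).toList = [' '] := rfl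
  simp only [BAD_CHARACTERS, List.any_cons, List.any_nil, PySem.Str.isIn_eq, hws, hsplit,
    Bool.or_false]
  simp only [show ("(" : String).toList = ['('] from rfl, show (")" : String).toList = [')'] from rfl,
    show ("{" : String).toList = ['{'] from rfl, show ("}" : String).toList = ['}'] from rfl,
    show ("/" : String).toList = ['/'] from rfl, show ("," : String).toList = [','] from rfl,
    show ("." : String).toList = ['.'] from rfl, show ("+" : String).toList = ['+'] from rfl,
    show ("(){}/,.+" : String).toList = ['(', ')', '{', '}', '/', ',', '.', '+'] from rfl,
    show ("unknown" : String).toList = ['u','n','k','n','o','w','n'] from rfl,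
    isIn_single]
  have hcnt : decide (3 < city.toList.count ' ' + 1) = decide (2 < 0 + city.toList.count ' ') :=
    decide_eq_decide.mpr (by omega)
  have hunk : PySem.Chars.isIn ['u','n','k','n','o','w','n'] city.toList
      = decide (['u','n','k','n','o','w','n'] <:+: city.toList) := by
    rw [Bool.eq_iff_iff, decide_eq_true_eq]
    exact PySem.Chars.isIn_iff_infix _ _
  rw [hcnt, hunk]
  simp only [List.any_cons, List.any_nil, Bool.or_false]
  rw [Bool.eq_iff_iff]
  simp only [Bool.or_eq_true, decide_eq_true_eq]
  tauto
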